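-- pv_equiv track=rewrite | github.com/azraeltruthsay/gaia | candidates/gaia-core/gaia_core/utils/world_state.py | _capability_affordances
-- ===== SOURCE A (Python) =====
-- from typing import Dict, List
--
-- def _capability_affordances(tools: List[str]) -> List[str]:
--     """
--     Generate natural-language capability hints based on available tools.
--
--     This is intentionally fuzzy/semantic rather than keyword-matching.
--     The goal is to help GAIA understand what she *can* do, not prescribe
--     exact invocations.
--     """
--     affordances = []
--
--     # File exploration capabilities
--     file_tools = [t for t in tools if any(w in t.lower() for w in ['file', 'dir', 'tree', 'find', 'read', 'list'])]
--     if file_tools: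
--         affordances.append(
--             "You can explore your own codebase and knowledge files—search by name, "
--             "browse directories, or read documents to answer questions about yourself."
--         )
--
--     # Memory/semantic search capabilities
--     memory_tools = [t for t in tools if 'memory' in t.lower() or 'query' in t.lower()]
--     if memory_tools:
--         affordances.append(
--             "You have semantic memory—you can search your indexed knowledge for concepts, "
--             "not just filenames."
--         )
--
--     # Write capabilities
--     write_tools = [t for t in tools if 'write' in t.lower()]
--     if write_tools:
--         affordances.append(
--             "You can write files (with operator approval) to persist thoughts, notes, or outputs."
--         )
--
--     # Web research capabilities
--     web_tools = [t for t in tools if any(w in t.lower() for w in ['web', 'search', 'fetch'])]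
--     if web_tools:
--         affordances.append(
--             "You can search the web (web_search) and fetch pages (web_fetch) "
--             "from trusted sources to find real, verifiable information — "
--             "rules references, poems, documentation, facts. "
--             "When a user asks you to 'look something up', USE these tools."
--         )
--
--     return affordances
-- ===== SOURCE B (Python) =====
-- from typing import List
--
-- _FILE_KWS = ('file', 'dir', 'tree', 'find', 'read', 'list')
-- _WEB_KWS = ('web', 'search', 'fetch')
--
-- def _capability_affordances(tools: List[str]) -> List[str]:
--     has_file = has_mem = has_write = has_web = False
--     for t in tools:
--         tl = t.lower()
--         if any(w in tl for w in _FILE_KWS):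
--             has_file = True
--         if 'memory' in tl or 'query' in tl:
--             has_mem = True
--         if 'write' in tl:
--             has_write = True
--         if any(w in tl for w in _WEB_KWS):
--             has_web = True
--     out = []
--     if has_file:
--         out.append(
--             "You can explore your own codebase and knowledge files—search by name, "
--             "browse directories, or read documents to answer questions about yourself."
--         )
--     if has_mem:
--         out.append(
--             "You have semantic memory—you can search your indexed knowledge for concepts, "
--             "not just filenames."
--         )
--     if has_write:
--         out.append(
--             "You can write files (with operator approval) to persist thoughts, notes, or outputs."
--         )
--     if has_web:
--         out.append(
--             "You can search the web (web_search) and fetch pages (web_fetch) "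
--             "from trusted sources to find real, verifiable information — "
--             "rules references, poems, documentation, facts. "
--             "When a user asks you to 'look something up', USE these tools."
--         )
--     return out
-- ===== Notes on version B (the rewrite author's own statement) =====
-- stated objective: alternative
-- what changed: B replaces A's four separate list-comprehension scans (each building an intermediate filtered list) with a single pass over tools that lowercases each name once and maintains four boolean flags, then appends the four fixed strings guarded by the flags.
import Mathlib
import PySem

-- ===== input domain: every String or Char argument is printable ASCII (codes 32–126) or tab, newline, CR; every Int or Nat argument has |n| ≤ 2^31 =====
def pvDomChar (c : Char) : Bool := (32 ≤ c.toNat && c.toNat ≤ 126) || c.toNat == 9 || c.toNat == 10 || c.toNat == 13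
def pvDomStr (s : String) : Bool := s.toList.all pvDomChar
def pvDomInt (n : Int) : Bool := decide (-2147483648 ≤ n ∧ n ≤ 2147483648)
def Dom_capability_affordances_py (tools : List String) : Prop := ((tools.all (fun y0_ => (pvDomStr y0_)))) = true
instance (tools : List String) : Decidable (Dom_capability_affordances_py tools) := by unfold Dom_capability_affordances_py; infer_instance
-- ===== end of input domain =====

-- B replaces A's four separate filtering scans with one pass over tools maintaining
-- four boolean flags (each name lowercased once); same output, no intermediate lists.


-- the four affordance strings (shared literals)
def affFile : String :=
  "You can explore your own codebase and knowledge files—search by name, browse directories, or read documents to answer questions about yourself."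
def affMem : String :=
  "You have semantic memory—you can search your indexed knowledge for concepts, not just filenames."
def affWrite : String :=
  "You can write files (with operator approval) to persist thoughts, notes, or outputs."
def affWeb : String :=
  "You can search the web (web_search) and fetch pages (web_fetch) from trusted sources to find real, verifiable information — rules references, poems, documentation, facts. When a user asks you to 'look something up', USE these tools."

-- predicates, matching the Python membership tests per category
def isFileTool (t : String) : Bool :=
  (["file", "dir", "tree", "find", "read", "list"] : List String).any
    (fun w => PySem.Str.isIn w (PySem.Str.lower t))
def isMemTool (t : String) : Bool :=
  PySem.Str.isIn "memory" (PySem.Str.lower t) || PySem.Str.isIn "query" (PySem.Str.lower t)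
def isWriteTool (t : String) : Bool := PySem.Str.isIn "write" (PySem.Str.lower t)
def isWebTool (t : String) : Bool :=
  (["web", "search", "fetch"] : List String).any
    (fun w => PySem.Str.isIn w (PySem.Str.lower t))

-- ===== PORT A =====
-- four separate comprehensions (filters), each guarding an append
def capability_affordances_py (tools : List String) : List String :=
  let affordances : List String := []
  let file_tools := tools.filter isFileTool
  let affordances := if file_tools ≠ [] then affordances ++ [affFile] else affordances
  let memory_tools := tools.filter isMemTool
  let affordances := if memory_tools ≠ [] then affordances ++ [affMem] else affordances
  let write_tools := tools.filter isWriteTool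
  let affordances := if write_tools ≠ [] then affordances ++ [affWrite] else affordances
  let web_tools := tools.filter isWebTool
  let affordances := if web_tools ≠ [] then affordances ++ [affWeb] else affordances
  affordances

-- ===== PORT B =====
-- one fold over tools maintaining four boolean flags, then the guarded appends
def capability_affordances_py_alt (tools : List String) : List String :=
  let flags := tools.foldl
    (fun (s : Bool × Bool × Bool × Bool) t =>
      (s.1 || isFileTool t, s.2.1 || isMemTool t, s.2.2.1 || isWriteTool t, s.2.2.2 || isWebTool t))
    (false, false, false, false)
  let out : List String := []
  let out := if flags.1 then out ++ [affFile] else out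
  let out := if flags.2.1 then out ++ [affMem] else out
  let out := if flags.2.2.1 then out ++ [affWrite] else out
  let out := if flags.2.2.2 then out ++ [affWeb] else out
  out

-- ===== PRECONDITION & SPEC =====
def Spec_capability_affordances_py (tools : List String) (out : List String) : Prop := out = capability_affordances_py_alt tools
instance (tools : List String) (out : List String) : Decidable (Spec_capability_affordances_py tools out) := by unfold Spec_capability_affordances_py; infer_instance

-- ===== CLAIM (what is proved, stated in full; the proofs are below) =====
def Claim_equal_capability_affordances_py : Prop := ∀ (tools : List String), Dom_capability_affordances_py tools → Spec_capability_affordances_py tools (capability_affordances_py tools)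

-- ===== LEMMAS AND PROOFS =====

-- the flag fold splits componentwise
theorem foldl_flags (tools : List String) (a b c d : Bool) :
    tools.foldl
      (fun (s : Bool × Bool × Bool × Bool) t =>
        (s.1 || isFileTool t, s.2.1 || isMemTool t, s.2.2.1 || isWriteTool t, s.2.2.2 || isWebTool t))
      (a, b, c, d)
    = (tools.foldl (fun s t => s || isFileTool t) a,
       tools.foldl (fun s t => s || isMemTool t) b,
       tools.foldl (fun s t => s || isWriteTool t) c,
       tools.foldl (fun s t => s || isWebTool t) d) := by
  induction tools generalizing a b c d with
  | nil => rfl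
  | cons x xs ih => simp [List.foldl, ih]

-- a fold from true stays true
theorem foldl_or_true {α : Type} (p : α → Bool) (xs : List α) :
    xs.foldl (fun s t => s || p t) true = true := by
  induction xs with
  | nil => rfl
  | cons x xs ih => simpa [List.foldl] using ih

-- a disjunction fold equals nonemptiness of the filter
theorem foldl_or_eq_filter_ne {α : Type} (p : α → Bool) (xs : List α) :
    xs.foldl (fun s t => s || p t) false = decide (xs.filter p ≠ []) := by
  induction xs with
  | nil => simp
  | cons x xs ih =>
    by_cases h : p x = true
    · simp [List.foldl, List.filter, h, foldl_or_true]
    · simp only [Bool.not_eq_true] at h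
      simp [List.foldl, List.filter, h, ih]

theorem capability_affordances_py_spec : Claim_equal_capability_affordances_py := by
  intro tools _
  unfold Spec_capability_affordances_py capability_affordances_py capability_affordances_py_alt
  simp only [foldl_flags, foldl_or_eq_filter_ne, decide_eq_true_eq]
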